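-- pv_equiv track=rewrite | github.com/rda12345/Puzzles | house_damage_puzzle.py | damage
-- ===== SOURCE A (Python) =====
-- def find_non_special(l):
--     ''' Returns the index of the non-special element closest to the middle of
--         of the list.
--         If the function is given a list of tuples, the compare operation only
--         compares the first element which is the number of bricks.
--     '''
--     ns_indicies = []
--     L = len(l)
--     for i in range(len(l)-1):
--         if l[i+1] < l[i]:
--             ns_indicies.append(i)
--     if len(ns_indicies) == 0:
--         return None
--     diff = [abs(x-L//2) for x in ns_indicies]
--     ind_min = diff.index(min(diff))
--     return ns_indicies[ind_min]
--
-- def merge_sort(l,left,right,ind):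
--     """ sorts the list according to the ind index of the elements """
--     mid = (right + left)//2
--     if left == right:
--         return [l[mid]]
--     else:
--         l1 = merge_sort(l,left,mid,ind)
--         l2 = merge_sort(l,mid+1,right,ind)
--         return merge(l1,l2,ind)
--
-- def merge(l1,l2,ind):
--     sorted_list = []
--     i, j = 0, 0
--     while i < len(l1) and j < len(l2):
--         if l1[i][ind] > l2[j][ind]:
--             sorted_list.append(l2[j])
--             j += 1
--         else:
--             sorted_list.append(l1[i])
--             i += 1
--     # insert all the rest of the elements at the end of the sorted list
--     if i == len(l1):
--         sorted_list.extend(l2[j:])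
--     else:
--         sorted_list.extend(l1[i:])
--
--     return sorted_list
--
-- def damage(houses):
--     '''
--         Parameters
--              houses: list, contains three element lists, containing [number of bricks, damage,original houlse index]
--              damage: int, originaly set to be the number of bricks of each house. It gets updated recursively.
--         Returns
--             sorted_houses: list, contains three element lists, containing [number of bricks,
--                                                                            updated damage,original houlse index]
--                                  sorted by the brick number.
--     '''
--     k = find_non_special(houses)
--
--     # check if lists are sorted by finding if there is a non-special element in the list
--     # if sorted then evaluated damage using a two finger algorithm
--     if k == None:
--         return houses
--     else:
--         houses1 = damage(houses[:k+1])
--         houses2 = damage(houses[k+1:])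
--         for i in range(len(houses1)):
--             j = 0
--             cuml = 0
--             while j < len(houses2) and houses1[i] > houses2[j]: # The comparison operation compares the first
--                                                        # element so no need to add [0]
--                  cuml += houses2[j][0]
--                  j += 1
--             houses1[i][1] += cuml
--         houses1.extend(houses2)     # adding houses2 to houses1
--         # sorte the houses by the number of bricks and return the result
--         sorted_houses = merge_sort(houses1,0,len(houses1)-1,0)
--         return sorted_houses
-- ===== SOURCE B (Python) =====
-- def damage(houses):
--     if all(houses[i] <= houses[i + 1] for i in range(len(houses) - 1)):
--         return houses          # already in order: no later house is smaller, nothing to absorb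
--     updated = [[h[0], h[1] + sum(g[0] for g in houses[i + 1:] if g[0] < h[0])] + h[2:]
--                for i, h in enumerate(houses)]
--     return sorted(updated, key=lambda h: h[0])
-- ===== Notes on version B (the rewrite author's own statement) =====
-- stated objective: simpler
-- what changed: A's recursive divide-at-a-descent with in-place damage updates and a hand-written index mergesort is replaced by an already-in-order fast path plus one comprehension that adds, per house, the bricks of later houses with strictly fewer bricks, followed by one built-in stable sort by brick count.
-- outside the precondition, e.g. on damage([[2, 9], [2, 1]]): A returns [[2, 11], [2, 1]], B returns [[2, 9], [2, 1]]; on damage([[5, 1], [3]]): A returns [[3], [5, 4]], B raises IndexError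
import Mathlib
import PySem

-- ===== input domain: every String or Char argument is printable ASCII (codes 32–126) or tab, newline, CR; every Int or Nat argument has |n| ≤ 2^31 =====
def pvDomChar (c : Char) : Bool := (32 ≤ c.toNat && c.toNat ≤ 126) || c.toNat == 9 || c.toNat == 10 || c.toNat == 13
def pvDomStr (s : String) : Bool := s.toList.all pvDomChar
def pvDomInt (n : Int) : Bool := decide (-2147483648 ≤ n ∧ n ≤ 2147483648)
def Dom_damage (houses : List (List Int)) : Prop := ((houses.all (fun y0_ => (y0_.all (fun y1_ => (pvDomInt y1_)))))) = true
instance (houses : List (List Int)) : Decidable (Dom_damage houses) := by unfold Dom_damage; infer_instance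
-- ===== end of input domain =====

-- B replaces A's recursive divide-at-a-descent + in-place updates + hand-written mergesort by one
-- comprehension plus one built-in stable sort (objective: simpler). A mutates the inner lists of its
-- argument in place; B does not — the equivalence proved here is about the return value only.


-- ===== PORT A =====
-- Python list comparison 'a < b' on lists of ints (lexicographic, shorter list loses ties)
def pyLt : List Int → List Int → Bool
  | [], [] => false
  | [], _ :: _ => true
  | _ :: _, [] => false
  | a :: x, b :: y => if a < b then true else if b < a then false else pyLt x y

def find_non_special (l : List (List Int)) : Option Int :=
  let L : Int := l.length
  let ns : List Int := (PySem.List.pyRange 0 (L - 1) 1).foldl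
    (fun acc i => if pyLt (PySem.List.pyGetD l (i + 1) []) (PySem.List.pyGetD l i []) then acc ++ [i] else acc) []
  if ns.length = 0 then none
  else
    let diff := ns.map (fun x => |x - PySem.Int.floordiv L 2|)
    match PySem.List.min? diff (fun y => y) with
    | none => none        -- unreachable: diff is nonempty
    | some m =>
      match PySem.List.index? diff m with
      | none => none      -- unreachable: min(diff) ∈ diff
      | some indMin => some (PySem.List.pyGetD ns (indMin : Int) 0)

-- the 'while j < len(houses2) and houses1[i] > houses2[j]: cuml += houses2[j][0]' loop
def cumlLoop (u : List Int) : List (List Int) → Int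
  | [] => 0
  | v :: rest => if pyLt v u then PySem.List.pyGetD v 0 0 + cumlLoop u rest else 0

-- 'houses1[i][1] += cuml' (an inner list shorter than 2 would raise IndexError; excluded by Pre_)
def addDamage (u : List Int) (c : Int) : List Int :=
  match u with
  | a :: b :: t => a :: (b + c) :: t
  | u => u

def updateLoop (h1 h2 : List (List Int)) : List (List Int) :=
  h1.map (fun u => addDamage u (cumlLoop u h2))

-- merge(l1, l2, 0): the two-index while loop, as recursion on the two suffixes
-- (fuel = total remaining length only makes the recursion kernel-reducible; it is never exhausted)
def mergeGo : Nat → List (List Int) → List (List Int) → List (List Int)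
  | 0, l1, l2 => l1 ++ l2
  | _ + 1, [], l2 => l2
  | _ + 1, a :: x, [] => a :: x
  | f + 1, a :: x, b :: y =>
    if PySem.List.pyGetD b 0 0 < PySem.List.pyGetD a 0 0 then b :: mergeGo f (a :: x) y
    else a :: mergeGo f x (b :: y)

def mergeA (l1 l2 : List (List Int)) : List (List Int) := mergeGo (l1.length + l2.length) l1 l2

-- merge_sort(l, left, right, 0); fuel only makes the recursion total, it is never exhausted on A's calls
def msGo (l : List (List Int)) : Nat → Int → Int → List (List Int)
  | 0, _, _ => []
  | f + 1, left, right =>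
    let mid := PySem.Int.floordiv (right + left) 2
    if left = right then [PySem.List.pyGetD l mid []]
    else mergeA (msGo l f left mid) (msGo l f (mid + 1) right)

-- damage(houses); fuel = len(houses) suffices since both recursive calls get strictly shorter lists
def damageGo : Nat → List (List Int) → List (List Int)
  | 0, houses => houses
  | f + 1, houses =>
    match find_non_special houses with
    | none => houses
    | some k =>
      let h1 := damageGo f (PySem.List.slice houses none (some (k + 1)))
      let h2 := damageGo f (PySem.List.slice houses (some (k + 1)) none)
      let h1' := updateLoop h1 h2
      let all := h1' ++ h2
      msGo all all.length 0 ((all.length : Int) - 1)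

def damage (houses : List (List Int)) : List (List Int) := damageGo houses.length houses

-- ===== PORT B =====
-- Python list comparison 'a <= b' on lists of ints (lexicographic, shorter list wins ties)
def pyLe : List Int → List Int → Bool
  | [], _ => true
  | _ :: _, [] => false
  | a :: x, b :: y => if a < b then true else if b < a then false else pyLe x y

def sumSmaller (b : Int) (xs : List (List Int)) : Int :=
  xs.foldl (fun s g => if PySem.List.pyGetD g 0 0 < b then s + PySem.List.pyGetD g 0 0 else s) 0

def damage_alt (houses : List (List Int)) : List (List Int) :=
  if (PySem.List.pyRange 0 ((houses.length : Int) - 1) 1).all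
      (fun i => pyLe (PySem.List.pyGetD houses i []) (PySem.List.pyGetD houses (i + 1) [])) then
    houses
  else
  let updated := (PySem.List.enumerate houses 0).map (fun p =>
    PySem.List.pyGetD p.2 0 0 ::
      (PySem.List.pyGetD p.2 1 0 +
        sumSmaller (PySem.List.pyGetD p.2 0 0) (PySem.List.slice houses (some (p.1 + 1)) none)) ::
      PySem.List.slice p.2 (some 2) none)
  PySem.List.sorted updated (fun h => PySem.List.pyGetD h 0 0) false

-- ===== PRECONDITION & SPEC =====
-- Pre_ admits every already-ordered list (there both programs return the input unchanged) and
-- otherwise restricts to the function's documented shape — every house is [bricks, damage, …] with at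
-- least two entries (on shorter unsorted rows A raises IndexError except when the short rows all land
-- in untouched right parts, and B always raises) — with pairwise distinct brick counts: on duplicate
-- brick counts A's whole-list lexicographic comparisons make the damage absorbed among equal-brick
-- houses depend accidentally on already-updated damage fields.
def Pre_damage (houses : List (List Int)) : Prop :=
  ((∀ h ∈ houses, 2 ≤ h.length) ∧ (houses.map (fun h => h.getD 0 0)).Nodup) ∨
    List.IsChain (fun a b => ¬ List.Lex (· < ·) b a) houses
instance (houses : List (List Int)) : Decidable (Pre_damage houses) := by unfold Pre_damage; infer_instance
def pvWitness_damage : List (List Int) := [[2, 9], [1, 1]]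

def Spec_damage (houses : List (List Int)) (out : List (List Int)) : Prop := out = damage_alt houses
instance (houses : List (List Int)) (out : List (List Int)) : Decidable (Spec_damage houses out) := by
  unfold Spec_damage; infer_instance

-- ===== CLAIM =====
def Claim_equal_damage : Prop := ∀ (houses : List (List Int)), Dom_damage houses → Pre_damage houses → Spec_damage houses (damage houses)

-- ===== LEMMAS AND PROOFS =====
def key (h : List Int) : Int := h.getD 0 0

-- sum of bricks of the houses of X with strictly fewer bricks than b
def S (b : Int) (X : List (List Int)) : Int :=
  ((X.filter (fun g => decide (key g < b))).map key).sum

-- the specification value before sorting: every house plus the bricks of later strictly-smaller houses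
def updF : List (List Int) → List (List Int)
  | [] => []
  | h :: t => (key h :: (h.getD 1 0 + S (key h) t) :: h.drop 2) :: updF t

abbrev le2 (a b : List Int) : Prop := key a ≤ key b
abbrev lt2 (a b : List Int) : Prop := key a < key b

-- 'the list is already sorted in Python's list order' as a boolean adjacent check
def adjSorted : List (List Int) → Bool
  | [] => true
  | [_] => true
  | a :: b :: t => !pyLt b a && adjSorted (b :: t)

-- ---- pyLt vs key ----
lemma pyLt_eq_decide (a b : List Int) (ha : a ≠ []) (hb : b ≠ []) (hne : key a ≠ key b) :
    pyLt a b = decide (key a < key b) := by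
  cases a with
  | nil => exact absurd rfl ha
  | cons a0 x =>
    cases b with
    | nil => exact absurd rfl hb
    | cons b0 y =>
      simp only [key, List.getD_cons_zero] at hne ⊢
      rcases lt_trichotomy a0 b0 with h | h | h
      · simp [pyLt, h]
      · exact absurd h hne
      · simp [pyLt, h, not_lt_of_gt h]

lemma pyLt_false_le (a b : List Int) (ha : a ≠ []) (hb : b ≠ []) (h : pyLt b a = false) :
    key a ≤ key b := by
  cases a with
  | nil => exact absurd rfl ha
  | cons a0 x =>
    cases b with
    | nil => exact absurd rfl hb
    | cons b0 y =>
      simp only [key, List.getD_cons_zero]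
      by_contra hab
      rw [not_le] at hab
      simp [pyLt, hab] at h

lemma ne_nil_of_two_le (h : List Int) (hh : 2 ≤ h.length) : h ≠ [] := by
  intro hnil; subst hnil; simp at hh

-- ---- S ----
lemma S_append (b : Int) (X Y : List (List Int)) : S b (X ++ Y) = S b X + S b Y := by
  simp [S, List.filter_append]

lemma S_perm (b : Int) {X Y : List (List Int)} (h : X.Perm Y) : S b X = S b Y := by
  exact List.Perm.sum_eq (List.Perm.map _ (List.Perm.filter _ h))

lemma S_eq_zero (b : Int) (X : List (List Int)) (h : ∀ g ∈ X, ¬ key g < b) : S b X = 0 := by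
  have hf : X.filter (fun g => decide (key g < b)) = [] := by
    rw [List.filter_eq_nil_iff]; intro g hg; simpa using h g hg
  simp [S, hf]

lemma S_cons (b : Int) (x : List Int) (X : List (List Int)) :
    S b (x :: X) = (if key x < b then key x else 0) + S b X := by
  by_cases hc : key x < b <;> simp [S, hc]

lemma key_updF_head (h : List Int) (t : List (List Int)) :
    key (key h :: (h.getD 1 0 + S (key h) t) :: h.drop 2) = key h := rfl

-- ---- updF ----
lemma map_key_updF (X : List (List Int)) : (updF X).map key = X.map key := by
  induction X with
  | nil => rfl
  | cons h t ih => simp [updF, key, ih]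

lemma good2_updF (X : List (List Int)) : ∀ h ∈ updF X, 2 ≤ h.length := by
  induction X with
  | nil => intro h hh; cases hh
  | cons a t ih =>
    intro h hh
    rcases List.mem_cons.mp hh with hh | hh
    · subst hh; simp
    · exact ih h hh

lemma updF_append (L R : List (List Int)) :
    updF (L ++ R) = (updF L).map (fun u => addDamage u (S (key u) R)) ++ updF R := by
  induction L with
  | nil => simp [updF]
  | cons h t ih =>
    show updF (h :: (t ++ R)) = _
    rw [updF, ih, updF, List.map_cons]
    show _ = (addDamage _ (S (key (key h :: (h.getD 1 0 + S (key h) t) :: h.drop 2)) R)) :: _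
    rw [key_updF_head, addDamage, S_append, add_assoc]
    rfl

lemma updF_eq_self (X : List (List Int)) (h2 : ∀ h ∈ X, 2 ≤ h.length)
    (hp : X.Pairwise le2) : updF X = X := by
  induction X with
  | nil => rfl
  | cons h t ih =>
    have hh2 := h2 h (List.mem_cons_self ..)
    obtain ⟨a, b, r, rfl⟩ : ∃ a b r, h = a :: b :: r := by
      match h, hh2 with
      | a :: b :: r, _ => exact ⟨a, b, r, rfl⟩
    have hz : S (key (a :: b :: r)) t = 0 := by
      apply S_eq_zero
      intro g hg
      exact not_lt_of_ge ((List.pairwise_cons.mp hp).1 g hg)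
    rw [updF, hz, ih (fun x hx => h2 x (List.mem_cons_of_mem _ hx)) (List.pairwise_cons.mp hp).2]
    simp [key]

-- ---- cumlLoop / updateLoop ----
lemma cumlLoop_eq_S (u : List Int) (h2 : List (List Int)) (hu : u ≠ [])
    (hne2 : ∀ v ∈ h2, v ≠ []) (hp : h2.Pairwise le2) (hne : ∀ v ∈ h2, key v ≠ key u) :
    cumlLoop u h2 = S (key u) h2 := by
  induction h2 with
  | nil => simp [cumlLoop, S]
  | cons v rest ih =>
    have hvne : v ≠ [] := hne2 v (List.mem_cons_self ..)
    have hkne : key v ≠ key u := hne v (List.mem_cons_self ..)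
    rw [cumlLoop, pyLt_eq_decide v u hvne hu hkne]
    by_cases hlt : key v < key u
    · rw [S_cons, if_pos hlt]
      simp only [hlt, decide_true, if_true]
      rw [ih (fun w hw => hne2 w (List.mem_cons_of_mem _ hw)) (List.pairwise_cons.mp hp).2
            (fun w hw => hne w (List.mem_cons_of_mem _ hw))]
      simp [key, PySem.List.pyGetD_zero]
    · have huv : key u < key v := lt_of_le_of_ne (not_lt.mp hlt) (Ne.symm hkne)
      have hz : S (key u) (v :: rest) = 0 := by
        apply S_eq_zero
        intro g hg
        rcases List.mem_cons.mp hg with rfl | hg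
        · omega
        · have := (List.pairwise_cons.mp hp).1 g hg
          simp only [le2] at this
          omega
      rw [hz]
      simp [hlt]

-- ---- adjSorted and find_non_special ----
lemma adjSorted_iff_getElem (l : List (List Int)) :
    adjSorted l = true ↔ ∀ (j : Nat) (h : j + 1 < l.length), pyLt l[j + 1] l[j] = false := by
  induction l with
  | nil => simp [adjSorted]
  | cons a l ih =>
    cases l with
    | nil => simp [adjSorted]
    | cons b t =>
      rw [adjSorted, Bool.and_eq_true, Bool.not_eq_true', ih]
      constructor
      · rintro ⟨h0, hrest⟩ j hj
        cases j with
        | zero => simpa using h0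
        | succ j =>
          have := hrest j (by simpa using Nat.lt_of_succ_lt_succ hj)
          simpa using this
      · intro h
        refine ⟨by simpa using h 0 (by simp), fun j hj => ?_⟩
        have := h (j + 1) (by simpa using Nat.succ_lt_succ hj)
        simpa using this

def nsl (l : List (List Int)) : List Int :=
  (PySem.List.pyRange 0 ((l.length : Int) - 1) 1).filter
    (fun i => pyLt (PySem.List.pyGetD l (i + 1) []) (PySem.List.pyGetD l i []))

lemma fns_cases (l : List (List Int)) :
    (find_non_special l = none ∧ nsl l = []) ∨ (∃ k, find_non_special l = some k ∧ k ∈ nsl l) := by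
  have hns : find_non_special l =
      (if (nsl l).length = 0 then none
       else
         match PySem.List.min? ((nsl l).map (fun x => |x - PySem.Int.floordiv (l.length : Int) 2|)) (fun y => y) with
         | none => none
         | some m =>
           match PySem.List.index? ((nsl l).map (fun x => |x - PySem.Int.floordiv (l.length : Int) 2|)) m with
           | none => none
           | some indMin => some (PySem.List.pyGetD (nsl l) (indMin : Int) 0)) := by
    unfold find_non_special nsl
    dsimp only
    rw [PySem.List.foldl_append_ite_eq_filter
      (p := fun i => pyLt (PySem.List.pyGetD l (i + 1) []) (PySem.List.pyGetD l i []) = true)]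
    simp
  rw [hns]
  by_cases h0 : (nsl l).length = 0
  · exact Or.inl ⟨by rw [if_pos h0], List.length_eq_zero_iff.mp h0⟩
  · right
    rw [if_neg h0]
    have hne : (nsl l).map (fun x => |x - PySem.Int.floordiv (l.length : Int) 2|) ≠ [] := by
      intro hmapnil
      exact h0 (by simpa using congrArg List.length hmapnil)
    cases hmin : PySem.List.min? ((nsl l).map (fun x => |x - PySem.Int.floordiv (l.length : Int) 2|)) (fun y => y) with
    | none => exact absurd ((PySem.List.min?_eq_none_iff _ _).mp hmin) hne
    | some m =>
      have hm : m ∈ (nsl l).map (fun x => |x - PySem.Int.floordiv (l.length : Int) 2|) :=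
        PySem.List.min?_mem hmin
      cases hidx : PySem.List.index? ((nsl l).map (fun x => |x - PySem.Int.floordiv (l.length : Int) 2|)) m with
      | none =>
        have : (PySem.List.index? _ m).isSome = true := (PySem.List.index?_isSome_iff _ _).mpr hm
        rw [hidx] at this
        simp at this
      | some j =>
        obtain ⟨hj, -, -⟩ := PySem.List.getElem_of_index?_eq_some hidx
        dsimp only
        simp only [hidx]
        refine ⟨_, rfl, ?_⟩
        rw [PySem.List.pyGetD_natCast]
        have hjlen : j < (nsl l).length := by simpa using hj
        rw [List.getD_eq_getElem _ _ hjlen]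
        exact List.getElem_mem _

lemma mem_nsl_bounds (l : List (List Int)) (k : Int) (hk : k ∈ nsl l) :
    0 ≤ k ∧ k.toNat + 1 < l.length := by
  have := PySem.List.mem_pyRange_one.mp (List.mem_of_mem_filter hk)
  omega

lemma nsl_eq_nil_iff (l : List (List Int)) : nsl l = [] ↔ adjSorted l = true := by
  rw [adjSorted_iff_getElem, nsl, List.filter_eq_nil_iff]
  constructor
  · intro h j hj
    have hmem : ((j : Nat) : Int) ∈ PySem.List.pyRange 0 ((l.length : Int) - 1) 1 := by
      rw [PySem.List.mem_pyRange_one]; omega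
    have := h _ hmem
    rw [Bool.not_eq_true] at this
    rw [show ((j : Nat) : Int) + 1 = (((j + 1 : Nat)) : Int) by push_cast; ring] at this
    rw [PySem.List.pyGetD_natCast, PySem.List.pyGetD_natCast,
      List.getD_eq_getElem _ _ (by omega), List.getD_eq_getElem _ _ (by omega)] at this
    exact this
  · intro h i hi
    have hb := PySem.List.mem_pyRange_one.mp hi
    rw [Bool.not_eq_true]
    rw [show i = ((i.toNat : Nat) : Int) by omega,
      show ((i.toNat : Nat) : Int) + 1 = (((i.toNat + 1 : Nat)) : Int) by push_cast; ring,
      PySem.List.pyGetD_natCast, PySem.List.pyGetD_natCast,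
      List.getD_eq_getElem _ _ (by omega), List.getD_eq_getElem _ _ (by omega)]
    exact h i.toNat (by omega)

lemma adjSorted_pairwise (l : List (List Int)) (h2 : ∀ h ∈ l, 2 ≤ h.length)
    (h : adjSorted l = true) : l.Pairwise le2 := by
  induction l with
  | nil => exact List.Pairwise.nil
  | cons a l ih =>
    cases l with
    | nil => exact List.pairwise_singleton _ _
    | cons b t =>
      rw [adjSorted, Bool.and_eq_true, Bool.not_eq_true'] at h
      have hab : key a ≤ key b :=
        pyLt_false_le a b (ne_nil_of_two_le a (h2 a (List.mem_cons_self ..)))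
          (ne_nil_of_two_le b (h2 b (List.mem_cons_of_mem _ (List.mem_cons_self ..)))) h.1
      have hp := ih (fun x hx => h2 x (List.mem_cons_of_mem _ hx)) h.2
      refine List.Pairwise.cons ?_ hp
      intro x hx
      rcases List.mem_cons.mp hx with rfl | hx
      · exact hab
      · exact le_trans hab ((List.pairwise_cons.mp hp).1 x hx)

lemma fns_none_iff (l : List (List Int)) : find_non_special l = none ↔ adjSorted l = true := by
  rcases fns_cases l with ⟨hn, hnil⟩ | ⟨k, hs, hk⟩
  · rw [hn]
    exact iff_of_true rfl ((nsl_eq_nil_iff l).mp hnil)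
  · rw [hs]
    constructor
    · intro h; cases h
    · intro h
      rw [← nsl_eq_nil_iff] at h
      rw [h] at hk
      cases hk

lemma fns_some_bounds (l : List (List Int)) (k : Int) (h : find_non_special l = some k) :
    0 ≤ k ∧ k.toNat + 1 < l.length := by
  rcases fns_cases l with ⟨hn, -⟩ | ⟨k', hs, hk⟩
  · rw [hn] at h; cases h
  · rw [hs] at h
    have hkk := Option.some.inj h
    subst hkk
    exact mem_nsl_bounds l _ hk

-- ---- merge ----
lemma mergeGo_perm (f : Nat) (l1 l2 : List (List Int)) : (mergeGo f l1 l2).Perm (l1 ++ l2) := by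
  induction f generalizing l1 l2 with
  | zero => exact List.Perm.refl _
  | succ f ih =>
    cases l1 with
    | nil => simp [mergeGo]
    | cons a x =>
      cases l2 with
      | nil => simp [mergeGo]
      | cons b y =>
        rw [mergeGo]
        split
        · exact (List.Perm.cons b (ih (a :: x) y)).trans List.perm_middle.symm
        · exact List.Perm.cons a (ih x (b :: y))

lemma mergeGo_sorted (f : Nat) (l1 l2 : List (List Int)) (hf : l1.length + l2.length ≤ f)
    (h1 : l1.Pairwise le2) (h2 : l2.Pairwise le2) : (mergeGo f l1 l2).Pairwise le2 := by
  induction f generalizing l1 l2 with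
  | zero =>
    have : l1 = [] := by
      cases l1 with
      | nil => rfl
      | cons a x => simp at hf
    subst this
    simpa [mergeGo] using h2
  | succ f ih =>
    cases l1 with
    | nil => simpa [mergeGo] using h2
    | cons a x =>
      cases l2 with
      | nil => simpa [mergeGo] using h1
      | cons b y =>
        rw [mergeGo]
        split
        next hba =>
          have hba' : key b < key a := by
            simpa [key, PySem.List.pyGetD_zero] using hba
          refine List.Pairwise.cons ?_ (ih (a :: x) y (by simp at hf ⊢; omega) h1
            (List.pairwise_cons.mp h2).2)
          intro c hc
          have hc' : c ∈ (a :: x) ++ y := (mergeGo_perm f (a :: x) y).mem_iff.mp hc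
          rcases List.mem_append.mp hc' with hc' | hc'
          · rcases List.mem_cons.mp hc' with rfl | hc'
            · exact le_of_lt hba'
            · exact le_trans (le_of_lt hba') ((List.pairwise_cons.mp h1).1 c hc')
          · exact (List.pairwise_cons.mp h2).1 c hc'
        next hba =>
          have hab : key a ≤ key b := by
            simp only [key]
            have := (not_lt.mp (by simpa [key, PySem.List.pyGetD_zero] using hba))
            exact this
          refine List.Pairwise.cons ?_ (ih x (b :: y) (by simp at hf ⊢; omega)
            (List.pairwise_cons.mp h1).2 h2)
          intro c hc
          have hc' : c ∈ x ++ (b :: y) := (mergeGo_perm f x (b :: y)).mem_iff.mp hc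
          rcases List.mem_append.mp hc' with hc' | hc'
          · exact (List.pairwise_cons.mp h1).1 c hc'
          · rcases List.mem_cons.mp hc' with rfl | hc'
            · exact hab
            · exact le_trans hab ((List.pairwise_cons.mp h2).1 c hc')

-- ---- msGo: the merge sort returns a key-sorted permutation of the segment ----
lemma seg_split (l : List (List Int)) (a m r : Nat) (h1 : a ≤ m) (h2 : m < r) :
    (l.drop a).take (m - a + 1) ++ (l.drop (m + 1)).take (r - (m + 1) + 1)
      = (l.drop a).take (r - a + 1) := by
  conv_rhs => rw [show r - a + 1 = (m - a + 1) + (r - (m + 1) + 1) from by omega,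
    List.take_add, List.drop_drop]
  rw [show a + (m - a + 1) = m + 1 from by omega]

lemma msGo_spec (f : Nat) (l : List (List Int)) : ∀ (left right : Int), 0 ≤ left → left ≤ right →
    right < l.length → (right - left).toNat < f →
    (msGo l f left right).Perm ((l.drop left.toNat).take ((right - left).toNat + 1)) ∧
      (msGo l f left right).Pairwise le2 := by
  induction f with
  | zero => intro left right h0 h1 h2 h3; omega
  | succ f ih =>
    intro left right h0 h1 h2 h3
    rw [msGo]
    by_cases heq : left = right
    · subst heq
      rw [if_pos rfl]
      have hmid : PySem.Int.floordiv (left + left) 2 = left := by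
        rw [PySem.Int.floordiv_eq_ediv_of_pos (by norm_num)]; omega
      have hg : PySem.List.pyGetD l (PySem.Int.floordiv (left + left) 2) [] = l[left.toNat] := by
        rw [hmid]; exact PySem.List.pyGetD_eq_getElem l [] h0 h2
      rw [hg]
      have hseg : (l.drop left.toNat).take ((left - left).toNat + 1) = [l[left.toNat]] := by
        rw [show (left - left).toNat + 1 = 1 from by omega,
          List.drop_eq_getElem_cons (by omega : left.toNat < l.length)]
        rfl
      exact ⟨by rw [hseg], List.pairwise_singleton _ _⟩
    · rw [if_neg heq]
      have hlr : left < right := lt_of_le_of_ne h1 heq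
      have hmide : PySem.Int.floordiv (right + left) 2 = (right + left) / 2 :=
        PySem.Int.floordiv_eq_ediv_of_pos (by norm_num)
      set mid := PySem.Int.floordiv (right + left) 2 with hmiddef
      have hb1 : left ≤ mid := by omega
      have hb2 : mid < right := by omega
      obtain ⟨p1, s1⟩ := ih left mid h0 hb1 (by omega) (by omega)
      obtain ⟨p2, s2⟩ := ih (mid + 1) right (by omega) (by omega) h2 (by omega)
      have hseg : (l.drop left.toNat).take ((mid - left).toNat + 1) ++
          (l.drop (mid + 1).toNat).take ((right - (mid + 1)).toNat + 1)
          = (l.drop left.toNat).take ((right - left).toNat + 1) := by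
        have hs := seg_split l left.toNat mid.toNat right.toNat (by omega) (by omega)
        rw [show (mid - left).toNat = mid.toNat - left.toNat from by omega,
          show (mid + 1).toNat = mid.toNat + 1 from by omega,
          show (right - (mid + 1)).toNat = right.toNat - (mid.toNat + 1) from by omega,
          show (right - left).toNat = right.toNat - left.toNat from by omega]
        exact hs
      refine ⟨?_, mergeGo_sorted _ _ _ le_rfl s1 s2⟩
      unfold mergeA
      refine (mergeGo_perm _ _ _).trans ?_
      rw [← hseg]
      exact p1.append p2

-- ---- strictness from distinct keys ----
lemma pairwise_lt_of_le_nodup (X : List (List Int)) (hle : X.Pairwise le2)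
    (hnd : (X.map key).Nodup) : X.Pairwise lt2 := by
  induction X with
  | nil => exact List.Pairwise.nil
  | cons a t ih =>
    rw [List.map_cons, List.nodup_cons] at hnd
    refine List.Pairwise.cons ?_ (ih (List.pairwise_cons.mp hle).2 hnd.2)
    intro b hb
    have h1 : key a ≤ key b := (List.pairwise_cons.mp hle).1 b hb
    have h2 : key a ≠ key b := fun he => hnd.1 (he ▸ List.mem_map_of_mem hb)
    exact lt_of_le_of_ne h1 h2

-- ---- damage_alt as sorted ∘ updF ----
lemma key_fun_eq : (fun h => PySem.List.pyGetD h 0 0) = key := by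
  funext h; simp [key, PySem.List.pyGetD_zero]

lemma sumSmaller_eq_S (b : Int) (xs : List (List Int)) : sumSmaller b xs = S b xs := by
  unfold sumSmaller
  rw [PySem.List.foldl_ite_eq_foldl_filter (p := fun g => PySem.List.pyGetD g 0 0 < b)
    (f := fun s g => s + PySem.List.pyGetD g 0 0), PySem.List.foldl_add]
  simp only [S, PySem.List.pyGetD_zero, zero_add]
  rfl

lemma updF_getElem (X : List (List Int)) (k : Nat) (hk : k < X.length) :
    (updF X)[k]'(by rw [show (updF X).length = X.length from by
      simpa using congrArg List.length (map_key_updF X)]; exact hk) =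
      key X[k] :: (X[k].getD 1 0 + S (key X[k]) (X.drop (k + 1))) :: X[k].drop 2 := by
  induction X generalizing k with
  | nil => cases hk
  | cons h t ih =>
    cases k with
    | zero => simp [updF]
    | succ k =>
      have := ih k (by simpa using Nat.lt_of_succ_lt_succ hk)
      simpa [updF] using this

-- pyLt is Python's list '<', i.e. Mathlib's lexicographic order on lists
lemma pyLt_iff_lex (a b : List Int) : pyLt a b = true ↔ List.Lex (· < ·) a b := by
  induction a generalizing b with
  | nil =>
    cases b with
    | nil => simp [pyLt]
    | cons b0 y =>
      simp only [pyLt, true_iff]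
      exact List.Lex.nil
  | cons a0 x ih =>
    cases b with
    | nil =>
      simp only [pyLt, Bool.false_eq_true, false_iff]
      intro hlex; cases hlex
    | cons b0 y =>
      constructor
      · intro h
        rw [pyLt] at h
        split_ifs at h with h1 h2
        · exact List.Lex.rel h1
        · have : a0 = b0 := le_antisymm (not_lt.mp h2) (not_lt.mp h1)
          subst this
          exact List.Lex.cons (ih y |>.mp h)
      · intro hlex
        cases hlex with
        | rel h1 => rw [pyLt]; simp [h1]
        | cons htail =>
          rw [pyLt, if_neg (lt_irrefl a0), if_neg (lt_irrefl a0)]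
          exact ih _ |>.mpr htail

lemma pyLe_eq_not_pyLt (a b : List Int) : pyLe a b = !pyLt b a := by
  induction a generalizing b with
  | nil => cases b <;> simp [pyLe, pyLt]
  | cons a0 x ih =>
    cases b with
    | nil => simp [pyLe, pyLt]
    | cons b0 y =>
      rw [pyLe, pyLt]
      rcases lt_trichotomy a0 b0 with h | h | h
      · simp [h, not_lt_of_gt h]
      · subst h; simp [ih]
      · simp [h, not_lt_of_gt h]

-- B's fast-path test is exactly 'no adjacent descent'
lemma bGuard_eq_adjSorted (l : List (List Int)) :
    ((PySem.List.pyRange 0 ((l.length : Int) - 1) 1).all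
      (fun i => pyLe (PySem.List.pyGetD l i []) (PySem.List.pyGetD l (i + 1) []))) = adjSorted l := by
  by_cases hg : ∀ (j : Nat) (h : j + 1 < l.length), pyLt l[j + 1] l[j] = false
  · rw [(adjSorted_iff_getElem l).mpr hg]
    rw [List.all_eq_true]
    intro i hi
    have hb := PySem.List.mem_pyRange_one.mp hi
    rw [show i = ((i.toNat : Nat) : Int) by omega,
      show ((i.toNat : Nat) : Int) + 1 = (((i.toNat + 1 : Nat)) : Int) by push_cast; ring,
      PySem.List.pyGetD_natCast, PySem.List.pyGetD_natCast,
      List.getD_eq_getElem _ _ (by omega), List.getD_eq_getElem _ _ (by omega),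
      pyLe_eq_not_pyLt, hg i.toNat (by omega)]
    rfl
  · simp only [not_forall] at hg
    obtain ⟨j, hj, hlt⟩ := hg
    have h1 : adjSorted l = false := by
      cases hA : adjSorted l with
      | false => rfl
      | true => exact absurd ((adjSorted_iff_getElem l).mp hA j hj) hlt
    rw [h1, ← Bool.not_eq_true, List.all_eq_true]
    intro hall
    have hmem : ((j : Nat) : Int) ∈ PySem.List.pyRange 0 ((l.length : Int) - 1) 1 := by
      rw [PySem.List.mem_pyRange_one]; omega
    have := hall _ hmem
    rw [show ((j : Nat) : Int) + 1 = (((j + 1 : Nat)) : Int) by push_cast; ring,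
      PySem.List.pyGetD_natCast, PySem.List.pyGetD_natCast,
      List.getD_eq_getElem _ _ (by omega), List.getD_eq_getElem _ _ (by omega),
      pyLe_eq_not_pyLt] at this
    rw [Bool.not_eq_false] at hlt
    rw [hlt] at this
    cases this

-- Pre_'s 'already in Python list order' clause is the same adjacent check
lemma isChain_iff_adjSorted (l : List (List Int)) :
    List.IsChain (fun a b => ¬ List.Lex (· < ·) b a) l ↔ adjSorted l = true := by
  induction l with
  | nil => simp [adjSorted]
  | cons a l ih =>
    cases l with
    | nil => simp [adjSorted]
    | cons b t =>
      rw [List.isChain_cons_cons, adjSorted, Bool.and_eq_true, Bool.not_eq_true', ih, and_comm]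
      constructor
      · rintro ⟨hc, hR⟩
        refine ⟨?_, hc⟩
        cases hpy : pyLt b a with
        | false => rfl
        | true => exact absurd ((pyLt_iff_lex b a).mp hpy) hR
      · rintro ⟨hpy, hc⟩
        refine ⟨hc, fun hlex => ?_⟩
        rw [(pyLt_iff_lex b a).mpr hlex] at hpy
        cases hpy

lemma damage_alt_of_guard_false (houses : List (List Int)) (hg : adjSorted houses = false) :
    damage_alt houses = PySem.List.sorted (updF houses) key false := by
  unfold damage_alt
  rw [bGuard_eq_adjSorted, hg]
  simp only [Bool.false_eq_true, if_false]
  rw [key_fun_eq]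
  congr 1
  apply List.ext_getElem
  · simp [PySem.List.length_enumerate]
    simpa using (congrArg List.length (map_key_updF houses)).symm
  · intro k hk1 hk2
    have hk : k < houses.length := by simpa [PySem.List.length_enumerate] using hk1
    rw [List.getElem_map, PySem.List.getElem_enumerate houses 0 k (by
      simpa [PySem.List.length_enumerate] using hk)]
    rw [updF_getElem houses k hk]
    dsimp only
    rw [show (0 : Int) + (k : Int) + 1 = (((k + 1 : Nat)) : Int) from by push_cast; ring]
    rw [PySem.List.slice_from_natCast, sumSmaller_eq_S]
    rw [show (2 : Int) = ((2 : Nat) : Int) from rfl, PySem.List.slice_from_natCast]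
    rw [PySem.List.pyGetD_zero, PySem.List.pyGetD_ofNat' houses[k] 1 0]
    rfl

-- ---- main induction ----
lemma S_updF (b : Int) (X : List (List Int)) : S b (updF X) = S b X := by
  induction X with
  | nil => rfl
  | cons h t ih => rw [updF, S_cons, S_cons, ih, key_updF_head]

lemma length_updF (X : List (List Int)) : (updF X).length = X.length := by
  simpa using congrArg List.length (map_key_updF X)

lemma nodup_split (t : Nat) (l : List (List Int)) (f : List Int → Int) (h : (l.map f).Nodup) :
    ((l.take t).map f).Nodup ∧ ((l.drop t).map f).Nodup ∧
      ∀ a ∈ (l.take t).map f, a ∉ (l.drop t).map f := by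
  rw [List.map_take, List.map_drop]
  rw [← List.take_append_drop t (l.map f), List.nodup_append] at h
  obtain ⟨h1, h2, h3⟩ := h
  exact ⟨h1, h2, fun a ha hb => h3 a ha a hb rfl⟩

lemma main_ind : ∀ (f : Nat) (houses : List (List Int)), houses.length ≤ f →
    (∀ h ∈ houses, 2 ≤ h.length) → (houses.map (fun h => h.getD 0 0)).Nodup →
    damageGo f houses = PySem.List.sorted (updF houses) key false := by
  intro f
  induction f with
  | zero =>
    intro houses hlen _ _
    have : houses = [] := List.length_eq_zero_iff.mp (Nat.le_zero.mp hlen)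
    subst this
    rfl
  | succ f ih =>
    intro houses hlen hrows hnd
    rw [damageGo]
    cases hfns : find_non_special houses with
    | none =>
      have hsorted := adjSorted_pairwise houses hrows ((fns_none_iff houses).mp hfns)
      rw [updF_eq_self houses hrows hsorted,
        PySem.List.sorted_eq_self_of_pairwise houses key hsorted]
    | some k =>
      obtain ⟨hk0, hkb⟩ := fns_some_bounds houses k hfns
      set n := houses.length with hn
      set t := (k + 1).toNat with ht
      have htb : 1 ≤ t ∧ t < n := by omega
      have hsl1 : PySem.List.slice houses none (some (k + 1)) = houses.take t :=
        PySem.List.slice_to houses (by omega : (0:Int) ≤ k + 1)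
      have hsl2 : PySem.List.slice houses (some (k + 1)) none = houses.drop t :=
        PySem.List.slice_from houses (by omega : (0:Int) ≤ k + 1)
      obtain ⟨hndT, hndD, hdisj⟩ := nodup_split t houses _ hnd
      have hrowsT : ∀ h ∈ houses.take t, 2 ≤ h.length :=
        fun h hh => hrows h (List.mem_of_mem_take hh)
      have hrowsD : ∀ h ∈ houses.drop t, 2 ≤ h.length :=
        fun h hh => hrows h (List.mem_of_mem_drop hh)
      have h1eq := ih (houses.take t) (by simp [List.length_take]; omega) hrowsT hndT
      have h2eq := ih (houses.drop t) (by simp [List.length_drop]; omega) hrowsD hndD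
      dsimp only
      rw [hsl1, hsl2, h1eq, h2eq]
      set T := houses.take t
      set D := houses.drop t
      set h1 := PySem.List.sorted (updF T) key false with hh1
      set h2 := PySem.List.sorted (updF D) key false with hh2
      -- every row of h1 / h2 has length ≥ 2
      have hr1 : ∀ u ∈ h1, 2 ≤ u.length := fun u hu =>
        good2_updF T u ((PySem.List.mem_sorted _ _ _ _).mp hu)
      have hr2 : ∀ v ∈ h2, 2 ≤ v.length := fun v hv =>
        good2_updF D v ((PySem.List.mem_sorted _ _ _ _).mp hv)
      -- keys of h1 live in T's keys, keys of h2 in D's keys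
      have hkey1 : ∀ u ∈ h1, key u ∈ T.map key := by
        intro u hu
        rw [← map_key_updF]
        exact List.mem_map_of_mem ((PySem.List.mem_sorted _ _ _ _).mp hu)
      have hkey2 : ∀ v ∈ h2, key v ∈ D.map key := by
        intro v hv
        rw [← map_key_updF]
        exact List.mem_map_of_mem ((PySem.List.mem_sorted _ _ _ _).mp hv)
      -- the inner while loop computes S (key u) D
      have hupd : updateLoop h1 h2 = h1.map (fun u => addDamage u (S (key u) D)) := by
        unfold updateLoop
        apply List.map_congr_left
        intro u hu
        have hcum : cumlLoop u h2 = S (key u) h2 := by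
          apply cumlLoop_eq_S u h2 (ne_nil_of_two_le u (hr1 u hu))
            (fun v hv => ne_nil_of_two_le v (hr2 v hv))
            (PySem.List.sorted_pairwise (updF D) key)
          intro v hv heq
          exact hdisj (key u) (hkey1 u hu) (heq ▸ hkey2 v hv)
        rw [hcum, S_perm (key u) (PySem.List.sorted_perm (updF D) key false), S_updF]
      -- the concatenation is a permutation of updF houses
      have hperm : (updateLoop h1 h2 ++ h2).Perm (updF houses) := by
        conv_rhs => rw [← List.take_append_drop t houses]
        rw [updF_append, hupd]
        exact ((PySem.List.sorted_perm (updF T) key false).map _).append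
          (PySem.List.sorted_perm (updF D) key false)
      set all := updateLoop h1 h2 ++ h2 with hall
      have hlall : all.length = n := by
        rw [hperm.length_eq, length_updF]
      obtain ⟨hOperm, hOsort⟩ := msGo_spec all.length all 0 ((all.length : Int) - 1)
        le_rfl (by omega) (by omega) (by omega)
      have hseg : (all.drop (0 : Int).toNat).take (((all.length : Int) - 1 - 0).toNat + 1) = all := by
        rw [show ((all.length : Int) - 1 - 0).toNat + 1 = all.length from by omega]
        simp
      rw [hseg] at hOperm
      have hOp : (msGo all all.length 0 ((all.length : Int) - 1)).Perm (updF houses) :=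
        hOperm.trans hperm
      have hOnd : ((msGo all all.length 0 ((all.length : Int) - 1)).map key).Nodup := by
        rw [(hOp.map key).nodup_iff, map_key_updF]
        exact hnd
      exact (PySem.List.sorted_eq_of_perm_of_pairwise_lt _ _ key hOp
        (pairwise_lt_of_le_nodup _ hOsort hOnd)).symm

lemma damageGo_of_none (f : Nat) (houses : List (List Int))
    (h : find_non_special houses = none) : damageGo f houses = houses := by
  cases f with
  | zero => rfl
  | succ f => rw [damageGo, h]

lemma damage_alt_of_guard_true (houses : List (List Int)) (hg : adjSorted houses = true) :
    damage_alt houses = houses := by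
  unfold damage_alt
  rw [bGuard_eq_adjSorted, hg]
  rfl

-- ===== VERDICT =====
theorem damage_spec : Claim_equal_damage := by
  intro houses _hdom hpre
  unfold Spec_damage
  cases hA : adjSorted houses with
  | true =>
    rw [damage_alt_of_guard_true houses hA]
    exact damageGo_of_none _ _ ((fns_none_iff houses).mpr hA)
  | false =>
    rcases hpre with ⟨hrows, hnd⟩ | hchain
    · rw [damage_alt_of_guard_false houses hA]
      exact main_ind houses.length houses le_rfl hrows hnd
    · rw [(isChain_iff_adjSorted houses).mp hchain] at hA
      cases hA
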